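-- pv_equiv track=rewrite | github.com/Addyyaa/testTool | fileTransfer/gui/main_window.py | _normalize_unix_path
-- ===== SOURCE A (Python) =====
-- def _normalize_unix_path(path: str) -> str:
--     """规范化Unix路径"""
--     if not path:
--         return '/'
--
--     path = path.replace('\\', '/')
--
--     if not path.startswith('/'):
--         path = '/' + path
--
--     while '//' in path:
--         path = path.replace('//', '/')
--
--     if path != '/' and path.endswith('/'):
--         path = path.rstrip('/')
--
--     return path
-- ===== SOURCE B (Python) =====
-- def _normalize_unix_path(path: str) -> str:
--     parts = [p for p in path.replace('\\', '/').split('/') if p]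
--     return '/' + '/'.join(parts)
-- ===== Notes on version B (the rewrite author's own statement) =====
-- stated objective: simpler
-- what changed: Replaced the empty-string guard, leading-slash insertion, repeated double-slash collapse loop and conditional rstrip with a single pass: split on the separator, drop empty components, join and prefix the root.
import Mathlib
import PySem

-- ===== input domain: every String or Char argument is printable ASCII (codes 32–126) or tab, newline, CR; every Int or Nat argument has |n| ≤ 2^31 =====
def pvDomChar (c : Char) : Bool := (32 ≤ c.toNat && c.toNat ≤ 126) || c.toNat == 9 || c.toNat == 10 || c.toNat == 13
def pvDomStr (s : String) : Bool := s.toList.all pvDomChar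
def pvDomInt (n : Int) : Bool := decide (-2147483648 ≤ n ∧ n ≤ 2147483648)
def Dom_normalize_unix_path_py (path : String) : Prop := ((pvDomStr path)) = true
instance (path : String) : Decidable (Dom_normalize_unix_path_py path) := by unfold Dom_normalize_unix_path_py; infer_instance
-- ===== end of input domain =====

-- B replaces A's empty-string guard, leading-slash insertion, repeated double-slash collapse loop
-- and conditional rstrip by one split / drop-empty-components / join pass (objective: simpler).

-- ===== PORT A =====
-- helper recursion used only to prove termination of A's while-loop (one pass of "//"->"/")
def pvRep2 : List Char → List Char
  | [] => []
  | [c] => [c]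
  | c :: d :: t => if c = '/' ∧ d = '/' then '/' :: pvRep2 t else c :: pvRep2 (d :: t)

theorem pv_go2_eq (fuel : Nat) (l acc : List Char) (h : l.length ≤ fuel) :
    PySem.Chars.replace.go ['/','/'] ['/'] fuel l acc = acc.reverse ++ pvRep2 l := by
  induction fuel generalizing l acc with
  | zero => cases l with
    | nil => simp [PySem.Chars.replace.go, pvRep2]
    | cons c t => simp at h
  | succ n ih =>
    cases l with
    | nil => simp [PySem.Chars.replace.go, pvRep2]
    | cons c t =>
      cases t with
      | nil =>
        rw [PySem.Chars.replace.go]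
        have : ¬ (['/','/'].isPrefixOf [c] = true) := by
          simp [List.isPrefixOf]
        simp only [this, Bool.false_eq_true, if_false]
        rw [ih [] (c :: acc) (by simp)]
        simp [pvRep2]
      | cons d t2 =>
        rw [PySem.Chars.replace.go]
        by_cases hp : c = '/' ∧ d = '/'
        · obtain ⟨hc, hd⟩ := hp
          subst hc; subst hd
          have hpre : ['/','/'].isPrefixOf ('/' :: '/' :: t2) = true := by
            simp [List.isPrefixOf]
          simp only [hpre, if_true, List.length_cons, List.length_nil, List.drop_succ_cons,
            List.drop_zero, List.reverse_cons, List.reverse_nil, List.nil_append]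
          rw [show ['/'] ++ acc = '/' :: acc from rfl, ih t2 ('/' :: acc) (by simp at h ⊢; omega)]
          simp [pvRep2]
        · have hpre : ¬ (['/','/'].isPrefixOf (c :: d :: t2) = true) := by
            simp [List.isPrefixOf]; tauto
          simp only [hpre, Bool.false_eq_true, if_false]
          rw [ih (d :: t2) (c :: acc) (by simp at h ⊢; omega)]
          simp [pvRep2, hp]

theorem pv_replace2_eq (s : List Char) :
    PySem.Chars.replace s ['/','/'] ['/'] = pvRep2 s := by
  rw [PySem.Chars.replace]
  simp only [List.isEmpty_cons, Bool.false_eq_true, if_false]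
  exact pv_go2_eq s.length s [] (le_refl _)

theorem pv_ds_infix_cons (c : Char) (t : List Char) :
    (['/','/'] <:+: (c :: t)) ↔ (c = '/' ∧ t.head? = some '/') ∨ ['/','/'] <:+: t := by
  rw [List.infix_cons_iff]
  cases t with
  | nil =>
    constructor
    · rintro (⟨u, hu⟩ | hi)
      · exfalso; have := congrArg List.length hu; simp at this
      · exfalso; exact absurd (List.infix_nil.mp hi) (by simp)
    · rintro (⟨_, hd⟩ | hi)
      · simp at hd
      · exact Or.inr hi
  | cons d t2 =>
    rw [List.cons_prefix_cons, List.cons_prefix_cons]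
    simp [eq_comm]

theorem pvRep2_len_le (s : List Char) : (pvRep2 s).length ≤ s.length := by
  induction s using pvRep2.induct with
  | case1 => simp [pvRep2]
  | case2 c => simp [pvRep2]
  | case3 c d t h ih =>
      obtain ⟨hc, hd⟩ := h; subst hc; subst hd
      simp only [pvRep2, and_self, if_true, List.length_cons]
      simp only [List.length_cons] at ih
      omega
  | case4 c d t h ih =>
      simp only [pvRep2, if_neg h, List.length_cons]
      simp only [List.length_cons] at ih
      omega

theorem pvRep2_len_lt (s : List Char) (h : ['/','/'] <:+: s) :
    (pvRep2 s).length < s.length := by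
  induction s using pvRep2.induct with
  | case1 => exact absurd (List.infix_nil.mp h) (by simp)
  | case2 c =>
      exfalso
      rcases h with ⟨u, v, huv⟩
      have := congrArg List.length huv; simp at this; omega
  | case3 c d t hcd ih =>
      obtain ⟨hc, hd⟩ := hcd; subst hc; subst hd
      simp only [pvRep2, and_self, if_true, List.length_cons]
      have := pvRep2_len_le t; omega
  | case4 c d t hcd ih =>
      simp only [pvRep2, if_neg hcd, List.length_cons]
      have : ['/','/'] <:+: (d :: t) := by
        rcases (pv_ds_infix_cons c (d :: t)).1 h with ⟨h1, h2⟩ | hi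
        · exact absurd ⟨h1, by simpa using h2⟩ hcd
        · exact hi
      have h2 := ih this
      simp only [List.length_cons] at h2 ⊢
      omega

-- termination of A's `while '//' in path` loop, cited by pvCollapse
theorem pvCollapse_dec (s : List Char) (h : PySem.Chars.isIn ['/','/'] s = true) :
    (PySem.Chars.replace s ['/','/'] ['/']).length < s.length := by
  rw [pv_replace2_eq]
  exact pvRep2_len_lt s ((PySem.Chars.isIn_iff_infix _ _).mp h)

-- A's while loop, step for step
def pvCollapse (s : List Char) : List Char :=
  if h : PySem.Chars.isIn ['/','/'] s = true then
    pvCollapse (PySem.Chars.replace s ['/','/'] ['/'])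
  else s
termination_by s.length
decreasing_by exact pvCollapse_dec s h

-- hand port of Python's str.rstrip('/') (PySem has no rstrip-with-chars); exact: drops trailing '/'s
def pvRstripSlash (s : List Char) : List Char := (s.reverse.dropWhile (· == '/')).reverse

def normalize_unix_path_py (path : String) : String :=
  if path.toList.isEmpty then "/"
  else
    let s0 := PySem.Chars.replace path.toList ['\\'] ['/']
    let s1 := if PySem.Chars.startswith s0 ['/'] then s0 else '/' :: s0
    let s2 := pvCollapse s1
    let s3 := if s2 ≠ ['/'] ∧ PySem.Chars.endswith s2 ['/'] = true then pvRstripSlash s2 else s2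
    String.ofList s3

-- ===== PORT B =====
def normalize_unix_path_py_alt (path : String) : String :=
  let parts := (PySem.Chars.splitOn (PySem.Chars.replace path.toList ['\\'] ['/']) ['/']).filter
    (fun p => !p.isEmpty)
  String.ofList ('/' :: PySem.Chars.join ['/'] parts)

-- ===== PRECONDITION & SPEC =====
def Spec_normalize_unix_path_py (path : String) (out : String) : Prop := out = normalize_unix_path_py_alt path
instance (path : String) (out : String) : Decidable (Spec_normalize_unix_path_py path out) := by unfold Spec_normalize_unix_path_py; infer_instance

-- ===== CLAIM (what is proved, stated in full; the proofs are below) =====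
def Claim_equal_normalize_unix_path_py : Prop := ∀ (path : String), Dom_normalize_unix_path_py path → Spec_normalize_unix_path_py path (normalize_unix_path_py path)

-- ===== LEMMAS AND PROOFS =====

-- one pass of the backslash replace is a map
theorem pv_go1_eq (fuel : Nat) (l acc : List Char) (h : l.length ≤ fuel) :
    PySem.Chars.replace.go ['\\'] ['/'] fuel l acc
      = acc.reverse ++ l.map (fun c => if c = '\\' then '/' else c) := by
  induction fuel generalizing l acc with
  | zero => cases l with
    | nil => simp [PySem.Chars.replace.go]
    | cons c t => simp at h
  | succ n ih =>
    cases l with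
    | nil => simp [PySem.Chars.replace.go]
    | cons c t =>
      rw [PySem.Chars.replace.go]
      by_cases hc : c = '\\'
      · subst hc
        have hpre : ['\\'].isPrefixOf ('\\' :: t) = true := by simp [List.isPrefixOf]
        simp only [hpre, if_true, List.length_cons, List.length_nil, List.drop_succ_cons,
          List.drop_zero, List.reverse_cons, List.reverse_nil, List.nil_append]
        rw [show ['/'] ++ acc = '/' :: acc from rfl, ih t ('/' :: acc) (by simp at h ⊢; omega)]
        simp
      · have hpre : ¬ (['\\'].isPrefixOf (c :: t) = true) := by
          simp [List.isPrefixOf]; exact fun h => hc h.symm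
        simp only [hpre, Bool.false_eq_true, if_false]
        rw [ih t (c :: acc) (by simp at h ⊢; omega)]
        simp [hc]

theorem pv_replace_bs_eq (s : List Char) :
    PySem.Chars.replace s ['\\'] ['/'] = s.map (fun c => if c = '\\' then '/' else c) := by
  rw [PySem.Chars.replace]
  simp only [List.isEmpty_cons, Bool.false_eq_true, if_false]
  exact pv_go1_eq s.length s [] (le_refl _)

-- split on '/' as a pair of structural recursions: first segment and remaining segments
def pvSp1 : List Char → List Char
  | [] => []
  | c :: t => if c = '/' then [] else c :: pvSp1 t

def pvSpt : List Char → List (List Char)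
  | [] => []
  | c :: t => if c = '/' then pvSp1 t :: pvSpt t else pvSpt t

theorem pv_goSplit_eq (fuel : Nat) (l cur : List Char) (acc : List (List Char)) (h : l.length ≤ fuel) :
    PySem.Chars.splitOn.go ['/'] fuel l cur acc
      = acc.reverse ++ ((cur.reverse ++ pvSp1 l) :: pvSpt l) := by
  induction fuel generalizing l cur acc with
  | zero => cases l with
    | nil => simp [PySem.Chars.splitOn.go, pvSp1, pvSpt]
    | cons c t => simp at h
  | succ n ih =>
    cases l with
    | nil => simp [PySem.Chars.splitOn.go, pvSp1, pvSpt]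
    | cons c t =>
      rw [PySem.Chars.splitOn.go]
      by_cases hc : c = '/'
      · subst hc
        have hpre : ['/'].isPrefixOf ('/' :: t) = true := by simp [List.isPrefixOf]
        simp only [hpre, if_true, List.length_cons, List.length_nil, List.drop_succ_cons, List.drop_zero]
        rw [ih t [] (cur.reverse :: acc) (by simp at h ⊢; omega)]
        simp [pvSp1, pvSpt]
      · have hpre : ¬ (['/'].isPrefixOf (c :: t) = true) := by
          simp [List.isPrefixOf]; exact fun h => hc h.symm
        simp only [hpre, Bool.false_eq_true, if_false]
        rw [ih t (c :: cur) acc (by simp at h ⊢; omega)]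
        simp [pvSp1, pvSpt, hc]

theorem pv_splitOn_eq (s : List Char) :
    PySem.Chars.splitOn s ['/'] = pvSp1 s :: pvSpt s := by
  rw [PySem.Chars.splitOn]
  rw [pv_goSplit_eq (s.length + 1) s [] [] (by omega)]
  simp

-- the filtered split parts ("parts" of B)
def pvParts (s : List Char) : List (List Char) :=
  (pvSp1 s :: pvSpt s).filter (fun p => !p.isEmpty)

theorem pvParts_slash (s : List Char) : pvParts ('/' :: s) = pvParts s := by
  simp [pvParts, pvSp1, pvSpt]

-- one collapse pass preserves the first segment and the filtered parts
theorem pvRep2_sp1 (s : List Char) : pvSp1 (pvRep2 s) = pvSp1 s := by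
  induction s using pvRep2.induct with
  | case1 => rfl
  | case2 c => rfl
  | case3 c d t h ih =>
      obtain ⟨hc, hd⟩ := h; subst hc; subst hd
      simp [pvRep2, pvSp1]
  | case4 c d t h ih =>
      simp only [pvRep2, if_neg h]
      by_cases hc : c = '/'
      · simp [pvSp1, hc]
      · simp [pvSp1, hc, ih]

theorem pvRep2_parts (s : List Char) :
    (pvSpt (pvRep2 s)).filter (fun p => !p.isEmpty) = (pvSpt s).filter (fun p => !p.isEmpty) := by
  induction s using pvRep2.induct with
  | case1 => rfl
  | case2 c => rfl
  | case3 c d t h ih =>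
      obtain ⟨hc, hd⟩ := h; subst hc; subst hd
      simp only [pvRep2, and_self, if_true]
      simp [pvSpt, pvSp1, pvRep2_sp1, List.filter_cons, ih]
  | case4 c d t h ih =>
      simp only [pvRep2, if_neg h]
      by_cases hc : c = '/'
      · simp [pvSpt, hc, pvRep2_sp1, List.filter_cons, ih]
      · simp [pvSpt, hc, ih]

theorem pvRep2_head (s : List Char) (h : s.head? = some '/') :
    (pvRep2 s).head? = some '/' := by
  cases s with
  | nil => simp at h
  | cons c t =>
    cases t with
    | nil => simpa [pvRep2] using h
    | cons d t2 =>
      simp only [List.head?_cons, Option.some.injEq] at h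
      subst h
      by_cases hd : d = '/'
      · subst hd; simp [pvRep2]
      · simp [pvRep2, hd]

-- the collapse loop: same invariants, and its result has no '//'
theorem pvCollapse_parts (s : List Char) : pvParts (pvCollapse s) = pvParts s := by
  induction s using pvCollapse.induct with
  | case1 s h ih =>
      rw [pvCollapse, dif_pos h, ih, pv_replace2_eq]
      simp [pvParts, List.filter_cons, pvRep2_sp1, pvRep2_parts]
  | case2 s h => rw [pvCollapse, dif_neg h]

theorem pvCollapse_head (s : List Char) (h : s.head? = some '/') :
    (pvCollapse s).head? = some '/' := by
  induction s using pvCollapse.induct with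
  | case1 s hc ih =>
      rw [pvCollapse, dif_pos hc]
      exact ih (by rw [pv_replace2_eq]; exact pvRep2_head s h)
  | case2 s hc => rw [pvCollapse, dif_neg hc]; exact h

theorem pvCollapse_noDS (s : List Char) : ¬ (['/','/'] <:+: pvCollapse s) := by
  induction s using pvCollapse.induct with
  | case1 s h ih => rw [pvCollapse, dif_pos h]; exact ih
  | case2 s h =>
      rw [pvCollapse, dif_neg h]
      intro hinf
      exact h ((PySem.Chars.isIn_iff_infix _ _).mpr hinf)

-- rstrip('/') structural facts
theorem pvRs_nil : pvRstripSlash [] = [] := rfl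

theorem pvRs_cons (c : Char) (u : List Char) :
    pvRstripSlash (c :: u)
      = if pvRstripSlash u = [] then (if c = '/' then [] else [c]) else c :: pvRstripSlash u := by
  unfold pvRstripSlash
  rw [List.reverse_cons, List.dropWhile_append]
  by_cases h : List.dropWhile (· == '/') u.reverse = []
  · simp only [h, List.isEmpty_nil, if_true, List.reverse_nil, if_true, List.reverse_eq_nil_iff.mpr h]
    by_cases hc : c = '/'
    · simp [List.dropWhile, hc]
    · simp only [List.dropWhile, hc, if_false]
      have : (c == '/') = false := by simpa using hc
      simp [this]
  · have hne : (List.dropWhile (· == '/') u.reverse).isEmpty = false := by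
      simpa [List.isEmpty_iff] using h
    have hne2 : ¬ ((List.dropWhile (· == '/') u.reverse).reverse = []) := by
      simpa using h
    simp [hne, hne2]

theorem pvRs_head (u : List Char) (h : pvRstripSlash u ≠ []) :
    (pvRstripSlash u).head? = u.head? := by
  cases u with
  | nil => exact absurd pvRs_nil h
  | cons c t =>
    rw [pvRs_cons] at h ⊢
    split_ifs at h ⊢ with h1 h2
    · simp at h
    · simp
    · simp

theorem pvRs_eq_self (u : List Char) (h : u.getLast? ≠ some '/') : pvRstripSlash u = u := by
  unfold pvRstripSlash
  cases hr : u.reverse with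
  | nil => simpa using congrArg List.reverse hr
  | cons c r =>
    have hc : ¬ (c = '/') := by
      intro hc
      apply h
      rw [List.getLast?_eq_head?_reverse, hr, hc]
      simp
    rw [List.dropWhile_cons_of_neg (by simpa using hc), ← hr]
    exact List.reverse_reverse u

theorem pvRs_ne_nil (d : Char) (u : List Char) (hd : d ≠ '/') :
    pvRstripSlash (d :: u) ≠ [] := by
  rw [pvRs_cons]
  split_ifs with h1
  · simp [hd]
  · simp

-- drop one leading slash
def pvDl (x : List Char) : List Char := if x.head? = some '/' then x.tail else x

theorem pv_join_parts_ne_nil (L : List (List Char)) (hL : L ≠ [])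
    (hall : ∀ x ∈ L, x ≠ []) : PySem.Chars.join ['/'] L ≠ [] := by
  match L with
  | [] => exact absurd rfl hL
  | [a] =>
      rw [PySem.Chars.join_singleton]
      exact hall a (by simp)
  | a :: b :: r =>
      rw [PySem.Chars.join_cons_cons]
      intro hcon
      have := congrArg List.length hcon
      simp at this

theorem pv_join_prepend (c : Char) (a : List Char) (M : List (List Char)) :
    PySem.Chars.join ['/'] ((c :: a) :: M) = c :: PySem.Chars.join ['/'] (a :: M) := by
  cases M with
  | nil => simp [PySem.Chars.join_singleton]
  | cons b r => simp [PySem.Chars.join_cons_cons]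

-- endswith / startswith bridges for a single-char pattern
theorem pv_endswith_slash (s : List Char) :
    PySem.Chars.endswith s ['/'] = true ↔ s.getLast? = some '/' := by
  rw [PySem.Chars.endswith, List.isSuffixOf_iff_suffix, List.getLast?_eq_some_iff]
  constructor
  · rintro ⟨p, hp⟩; exact ⟨p, hp.symm⟩
  · rintro ⟨p, hp⟩; exact ⟨p, hp.symm⟩

theorem pv_startswith_slash (s : List Char) :
    PySem.Chars.startswith s ['/'] = true ↔ s.head? = some '/' := by
  cases s with
  | nil => simp [PySem.Chars.startswith, List.isPrefixOf]
  | cons c t =>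
    simp only [PySem.Chars.startswith, List.isPrefixOf, List.head?_cons, Option.some.injEq,
      Bool.and_eq_true, beq_iff_eq]
    constructor
    · rintro ⟨h1, _⟩; exact h1.symm
    · intro h1; exact ⟨h1.symm, trivial⟩

theorem pv_parts_all_ne_nil (s : List Char) : ∀ x ∈ pvParts s, x ≠ [] := by
  intro x hx
  have := (List.mem_filter.mp hx).2
  simpa using this

theorem pv_parts_nil_iff (s : List Char) :
    PySem.Chars.join ['/'] (pvParts s) = [] ↔ pvParts s = [] := by
  constructor
  · intro h
    by_contra hne
    exact pv_join_parts_ne_nil (pvParts s) hne (pv_parts_all_ne_nil s) h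
  · intro h; rw [h, PySem.Chars.join_nil]

-- THE core lemma: B's join of the filtered parts of t equals A's stripped tail
theorem pvMain (t : List Char) (h : ¬ (['/','/'] <:+: t)) :
    PySem.Chars.join ['/'] (pvParts t) = pvDl (pvRstripSlash t) := by
  have key : ∀ (n : Nat) (t : List Char), t.length ≤ n → ¬ (['/','/'] <:+: t) →
      PySem.Chars.join ['/'] (pvParts t) = pvDl (pvRstripSlash t) := by
    intro n
    induction n with
    | zero =>
      intro t ht _
      have h0 : t = [] := by
        cases t with
        | nil => rfl
        | cons a b => simp at ht
      subst h0
      simp [pvParts, pvSp1, pvSpt, pvDl, pvRstripSlash, PySem.Chars.join_nil]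
    | succ n ih =>
      intro t ht hnds
      cases t with
      | nil => simp [pvParts, pvSp1, pvSpt, pvDl, pvRstripSlash, PySem.Chars.join_nil]
      | cons c t2 =>
        rw [pv_ds_infix_cons] at hnds
        push Not at hnds
        obtain ⟨hhead, hnds2⟩ := hnds
        by_cases hc : c = '/'
        · -- leading slash: drop it on both sides
          subst hc
          have hh2 : t2.head? ≠ some '/' := hhead rfl
          have hIH := ih t2 (by simp at ht; omega) hnds2
          rw [pvParts_slash, hIH, pvRs_cons]
          by_cases hr : pvRstripSlash t2 = []
          · simp [hr, pvDl]
          · rw [if_neg hr]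
            have hdl : pvDl ('/' :: pvRstripSlash t2) = pvRstripSlash t2 := by simp [pvDl]
            rw [hdl]
            unfold pvDl
            rw [pvRs_head t2 hr, if_neg hh2]
        · -- head character is kept
          have hparts : pvParts (c :: t2) = (c :: pvSp1 t2) :: (pvSpt t2).filter (fun p => !p.isEmpty) := by
            simp [pvParts, pvSp1, pvSpt, hc, List.filter_cons]
          cases t2 with
          | nil =>
            simp [pvParts, pvSp1, pvSpt, hc, List.filter_cons, PySem.Chars.join_singleton,
              pvRstripSlash, pvDl, List.dropWhile]
          | cons d t3 =>
            by_cases hd : d = '/'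
            · -- segment of length one then a slash
              subst hd
              rw [pv_ds_infix_cons] at hnds2
              push Not at hnds2
              obtain ⟨hh3, hnds3⟩ := hnds2
              have hh3' : t3.head? ≠ some '/' := hh3 rfl
              have hIH := ih t3 (by simp at ht; omega) hnds3
              have hpc : pvParts (c :: '/' :: t3) = [c] :: pvParts t3 := by
                simp [pvParts, pvSp1, pvSpt, hc, List.filter_cons]
              rw [hpc]
              by_cases hr3 : pvRstripSlash t3 = []
              · have hp3 : pvParts t3 = [] := by
                  apply (pv_parts_nil_iff t3).mp
                  rw [hIH, hr3]
                  rfl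
                have h1 : pvRstripSlash ('/' :: t3) = [] := by
                  rw [pvRs_cons, if_pos hr3]
                  simp
                have h2 : pvRstripSlash (c :: '/' :: t3) = [c] := by
                  rw [pvRs_cons, if_pos h1, if_neg hc]
                rw [hp3, PySem.Chars.join_singleton, h2]
                simp [pvDl, hc]
              · have hJ : pvDl (pvRstripSlash t3) = pvRstripSlash t3 := by
                  unfold pvDl
                  rw [pvRs_head t3 hr3, if_neg hh3']
                have hjoin : PySem.Chars.join ['/'] (pvParts t3) = pvRstripSlash t3 := by
                  rw [hIH, hJ]
                have hp3ne : pvParts t3 ≠ [] := by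
                  intro hcon
                  apply hr3
                  rw [← hjoin, hcon, PySem.Chars.join_nil]
                obtain ⟨p, ps, hpps⟩ : ∃ p ps, pvParts t3 = p :: ps := by
                  cases hpp : pvParts t3 with
                  | nil => exact absurd hpp hp3ne
                  | cons p ps => exact ⟨p, ps, rfl⟩
                have h1 : pvRstripSlash ('/' :: t3) = '/' :: pvRstripSlash t3 := by
                  rw [pvRs_cons, if_neg hr3]
                have h2 : pvRstripSlash (c :: '/' :: t3) = c :: '/' :: pvRstripSlash t3 := by
                  rw [pvRs_cons, h1]
                  simp
                have h3 : PySem.Chars.join ['/'] (p :: ps) = pvRstripSlash t3 := by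
                  rw [← hpps, hjoin]
                rw [hpps, PySem.Chars.join_cons_cons, h3, h2]
                simp [pvDl, hc]
            · -- segment continues
              have hIH := ih (d :: t3) (by simp at ht ⊢; omega) hnds2
              have hrs2ne : pvRstripSlash (d :: t3) ≠ [] := pvRs_ne_nil d t3 hd
              have hdl2 : pvDl (pvRstripSlash (d :: t3)) = pvRstripSlash (d :: t3) := by
                unfold pvDl
                rw [pvRs_head _ hrs2ne, if_neg (by simp [hd])]
              rw [hdl2] at hIH
              have hparts2 : pvParts (d :: t3) = pvSp1 (d :: t3) :: (pvSpt (d :: t3)).filter (fun p => !p.isEmpty) := by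
                simp [pvParts, List.filter_cons, pvSp1, hd]
              have hpartsc : pvParts (c :: d :: t3) = (c :: pvSp1 (d :: t3)) :: (pvSpt (d :: t3)).filter (fun p => !p.isEmpty) := by
                simp [pvParts, List.filter_cons, pvSp1, pvSpt, hc]
              have h2 : pvRstripSlash (c :: d :: t3) = c :: pvRstripSlash (d :: t3) := by
                rw [pvRs_cons, if_neg hrs2ne]
              rw [hpartsc, pv_join_prepend, ← hparts2, hIH, h2]
              simp [pvDl, hc]
  exact key t.length t (le_refl _) h

-- A's final conditional rstrip, on a collapsed string '/'::t
theorem pv_finalStep (t : List Char) (hnds : ¬ (['/','/'] <:+: ('/' :: t))) :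
    (if ('/' :: t) ≠ ['/'] ∧ PySem.Chars.endswith ('/' :: t) ['/'] = true then pvRstripSlash ('/' :: t) else ('/' :: t))
      = '/' :: pvDl (pvRstripSlash t) := by
  rw [pv_ds_infix_cons] at hnds
  push Not at hnds
  obtain ⟨hhead, _⟩ := hnds
  have hh : t.head? ≠ some '/' := hhead rfl
  cases t with
  | nil => simp [pvRstripSlash, pvDl]
  | cons d t3 =>
    have hd : d ≠ '/' := by intro hcon; exact hh (by rw [hcon]; rfl)
    have hrne : pvRstripSlash (d :: t3) ≠ [] := pvRs_ne_nil d t3 hd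
    have hdl : pvDl (pvRstripSlash (d :: t3)) = pvRstripSlash (d :: t3) := by
      unfold pvDl
      rw [pvRs_head _ hrne, if_neg (by simp [hd])]
    rw [hdl]
    by_cases hend : (d :: t3).getLast? = some '/'
    · have hcond : ('/' :: d :: t3) ≠ ['/'] ∧ PySem.Chars.endswith ('/' :: d :: t3) ['/'] = true := by
        refine ⟨by simp, ?_⟩
        rw [pv_endswith_slash, List.getLast?_cons_cons]
        exact hend
      rw [if_pos hcond, pvRs_cons, if_neg hrne]
    · have hcond : ¬ (('/' :: d :: t3) ≠ ['/'] ∧ PySem.Chars.endswith ('/' :: d :: t3) ['/'] = true) := by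
        intro hcon
        rw [pv_endswith_slash, List.getLast?_cons_cons] at hcon
        exact hend hcon.2
      rw [if_neg hcond, pvRs_eq_self (d :: t3) hend]

-- assembling A's tail after the collapse loop
theorem pv_after_head (s1 : List Char) (hh : s1.head? = some '/') :
    (if pvCollapse s1 ≠ ['/'] ∧ PySem.Chars.endswith (pvCollapse s1) ['/'] = true
      then pvRstripSlash (pvCollapse s1) else pvCollapse s1)
      = '/' :: PySem.Chars.join ['/'] (pvParts s1) := by
  have h2h : (pvCollapse s1).head? = some '/' := pvCollapse_head s1 hh
  have h2n := pvCollapse_noDS s1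
  obtain ⟨t, ht⟩ : ∃ t, pvCollapse s1 = '/' :: t := by
    cases hc : pvCollapse s1 with
    | nil => rw [hc] at h2h; simp at h2h
    | cons a b =>
      rw [hc] at h2h
      simp only [List.head?_cons, Option.some.injEq] at h2h
      exact ⟨b, by rw [h2h]⟩
  rw [ht] at h2n ⊢
  rw [pv_finalStep t h2n]
  have hnds_t : ¬ (['/','/'] <:+: t) := by
    rw [pv_ds_infix_cons] at h2n
    push Not at h2n
    exact h2n.2
  rw [← pvMain t hnds_t]
  have hps : pvParts s1 = pvParts t := by
    rw [← pvCollapse_parts s1, ht, pvParts_slash]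
  rw [hps]

theorem pv_ports_agree (path : String) :
    normalize_unix_path_py path = normalize_unix_path_py_alt path := by
  unfold normalize_unix_path_py normalize_unix_path_py_alt
  by_cases h0 : path.toList.isEmpty
  · rw [if_pos h0]
    have hl : path.toList = [] := by simpa using h0
    rw [hl, pv_replace_bs_eq]
    simp only [List.map_nil, pv_splitOn_eq]
    simp [pvSp1, pvSpt, PySem.Chars.join_nil]
  · rw [if_neg h0]
    simp only [pv_splitOn_eq]
    have hB : (pvSp1 (PySem.Chars.replace path.toList ['\\'] ['/'])
        :: pvSpt (PySem.Chars.replace path.toList ['\\'] ['/'])).filter (fun p => !p.isEmpty)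
        = pvParts (PySem.Chars.replace path.toList ['\\'] ['/']) := rfl
    rw [hB]
    set u := PySem.Chars.replace path.toList ['\\'] ['/'] with hu
    by_cases hsw : PySem.Chars.startswith u ['/'] = true
    · rw [if_pos hsw]
      rw [pv_after_head u ((pv_startswith_slash u).mp hsw)]
    · rw [if_neg hsw]
      rw [pv_after_head ('/' :: u) rfl]
      rw [pvParts_slash]

-- ===== VERDICT (by name: the statement is the Claim_ definition above) =====
theorem normalize_unix_path_py_spec : Claim_equal_normalize_unix_path_py := by
  intro path _
  unfold Spec_normalize_unix_path_py
  exact pv_ports_agree path
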